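-- pv_equiv track=rewrite | github.com/taijara/MinesweeperSolver | Regra_1_3_1.py | listarQuadradosLocal
-- ===== SOURCE A (Python) =====
-- def listarQuadradosLocal(n_linhas, n_colunas, tabuleiro):
--     contador = 0
--     listaQuadardos = {}
--     for i in range(n_linhas):
--         for j in range(n_colunas):
--             contador = contador + 1
--             # if tabuleiro[i][j][1] == 'I':
--             listaQuadardos.update({contador: (i, j)})
--     return listaQuadardos
-- ===== SOURCE B (Python) =====
-- def listarQuadradosLocal(n_linhas, n_colunas, tabuleiro):
--     if n_linhas <= 0 or n_colunas <= 0: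
--         return {}
--     return {k + 1: divmod(k, n_colunas) for k in range(n_linhas * n_colunas)}
-- ===== Notes on version B (the rewrite author's own statement) =====
-- stated objective: simpler
-- what changed: Replaces the nested row/column loops with an explicit counter by a single comprehension over the flat index k, recovering each coordinate in closed form with divmod(k, n_colunas).
import Mathlib
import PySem

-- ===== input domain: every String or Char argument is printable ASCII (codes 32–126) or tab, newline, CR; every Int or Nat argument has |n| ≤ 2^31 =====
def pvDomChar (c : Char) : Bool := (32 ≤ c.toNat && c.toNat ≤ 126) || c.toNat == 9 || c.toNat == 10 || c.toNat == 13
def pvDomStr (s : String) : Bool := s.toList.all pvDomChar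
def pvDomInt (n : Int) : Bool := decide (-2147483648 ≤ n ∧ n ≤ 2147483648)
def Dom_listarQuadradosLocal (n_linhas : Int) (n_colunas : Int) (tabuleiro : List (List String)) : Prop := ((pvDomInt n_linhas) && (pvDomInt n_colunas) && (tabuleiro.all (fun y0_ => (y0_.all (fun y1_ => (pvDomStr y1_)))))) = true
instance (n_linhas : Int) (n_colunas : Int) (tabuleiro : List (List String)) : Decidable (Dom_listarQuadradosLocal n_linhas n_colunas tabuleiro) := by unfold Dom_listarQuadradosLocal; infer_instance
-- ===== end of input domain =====

-- B replaces A's nested loops + running counter by one flat pass with divmod; tabuleiro stays unused.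

-- ===== PORT A =====
def listarQuadradosLocal (n_linhas : Int) (n_colunas : Int) (tabuleiro : List (List String)) : List (Int × Int × Int) :=
  let st := (PySem.List.pyRange 0 n_linhas 1).foldl
    (fun (st : Int × PySem.Dict Int (Int × Int)) i =>
      (PySem.List.pyRange 0 n_colunas 1).foldl
        (fun st j => (st.1 + 1, st.2.insert (st.1 + 1) (i, j))) st)
    (0, PySem.Dict.empty)
  st.2.items

-- ===== PORT B =====
def listarQuadradosLocal_alt (n_linhas : Int) (n_colunas : Int) (tabuleiro : List (List String)) : List (Int × Int × Int) :=
  if n_linhas ≤ 0 ∨ n_colunas ≤ 0 then []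
  else (PySem.List.pyRange 0 (n_linhas * n_colunas) 1).map
    (fun k => (k + 1, PySem.Int.floordiv k n_colunas, PySem.Int.mod k n_colunas))

-- ===== PRECONDITION & SPEC =====
def Spec_listarQuadradosLocal (n_linhas : Int) (n_colunas : Int) (tabuleiro : List (List String)) (out : List (Int × Int × Int)) : Prop := out = listarQuadradosLocal_alt n_linhas n_colunas tabuleiro
instance (n_linhas : Int) (n_colunas : Int) (tabuleiro : List (List String)) (out : List (Int × Int × Int)) : Decidable (Spec_listarQuadradosLocal n_linhas n_colunas tabuleiro out) := by unfold Spec_listarQuadradosLocal; infer_instance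

-- ===== CLAIM (what is proved, stated in full; the proofs are below) =====
def Claim_equal_listarQuadradosLocal : Prop := ∀ (n_linhas : Int) (n_colunas : Int) (tabuleiro : List (List String)), Dom_listarQuadradosLocal n_linhas n_colunas tabuleiro → Spec_listarQuadradosLocal n_linhas n_colunas tabuleiro (listarQuadradosLocal n_linhas n_colunas tabuleiro)

-- ===== LEMMAS AND PROOFS =====

/-- The items produced by one row of A's loop: keys c+1, c+2, …, paired with (i, j). -/
def pvRowItems (i c : Int) : List Int → List (Int × Int × Int)
  | [] => []
  | j :: js => (c + 1, i, j) :: pvRowItems i (c + 1) js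

/-- The items produced by A's outer loop over rows `is`, counter starting at c. -/
def pvGridItems (nc c : Int) : List Int → List (Int × Int × Int)
  | [] => []
  | i :: is => pvRowItems i c (PySem.List.pyRange 0 nc 1) ++
      pvGridItems nc (c + ((PySem.List.pyRange 0 nc 1).length : Int)) is

lemma pvRowItems_key_le (i : Int) : ∀ (js : List Int) (c k : Int) (v : Int × Int),
    (k, v) ∈ pvRowItems i c js → k ≤ c + js.length := by
  intro js
  induction js with
  | nil => intro c k v h; simp [pvRowItems] at h
  | cons j js ih =>
    intro c k v h
    simp only [pvRowItems, List.mem_cons] at h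
    rcases h with h | h
    · simp only [Prod.mk.injEq] at h
      have hk := h.1
      simp only [List.length_cons]
      push_cast
      omega
    · have := ih (c + 1) k v h
      simp only [List.length_cons]
      push_cast
      omega

lemma pvInner (i : Int) : ∀ (js : List Int) (c : Int) (d : PySem.Dict Int (Int × Int)),
    (∀ k ∈ d.keys, k ≤ c) →
    js.foldl (fun (st : Int × PySem.Dict Int (Int × Int)) j =>
        (st.1 + 1, st.2.insert (st.1 + 1) (i, j))) (c, d)
      = (c + js.length, PySem.Dict.mk (d.items ++ pvRowItems i c js)) := by
  intro js
  induction js with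
  | nil => intro c d _; simp [pvRowItems]
  | cons j js ih =>
    intro c d hkeys
    have hc : d.contains (c + 1) = false := by
      by_contra h
      have ht : d.contains (c + 1) = true := by
        cases hb : d.contains (c + 1) <;> simp_all
      have hm := (PySem.Dict.contains_iff_mem_keys d (c + 1)).mp ht
      have := hkeys _ hm; omega
    have hins : d.insert (c + 1) (i, j) = PySem.Dict.mk (d.items ++ [(c + 1, (i, j))]) := by
      apply PySem.Dict.ext
      rw [PySem.Dict.items_insert_of_not_contains _ _ hc]
    simp only [List.foldl_cons, hins]
    rw [ih (c + 1) _ ?_]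
    · simp only [pvRowItems, List.length_cons, Prod.mk.injEq]
      refine ⟨by push_cast; ring, by simp [List.append_assoc]⟩
    · intro k hk
      simp only [PySem.Dict.keys, List.map_append, List.mem_append, List.map_cons,
        List.map_nil, List.mem_cons, List.not_mem_nil, or_false] at hk
      rcases hk with hk | hk
      · have : k ∈ d.keys := by simp [PySem.Dict.keys, hk]
        have := hkeys _ this; omega
      · omega

lemma pvOuter (nc : Int) : ∀ (is : List Int) (c : Int) (d : PySem.Dict Int (Int × Int)),
    (∀ k ∈ d.keys, k ≤ c) →
    is.foldl (fun (st : Int × PySem.Dict Int (Int × Int)) i =>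
        (PySem.List.pyRange 0 nc 1).foldl
          (fun st j => (st.1 + 1, st.2.insert (st.1 + 1) (i, j))) st) (c, d)
      = (c + is.length * ((PySem.List.pyRange 0 nc 1).length : Int),
         PySem.Dict.mk (d.items ++ pvGridItems nc c is)) := by
  intro is
  induction is with
  | nil => intro c d _; simp [pvGridItems]
  | cons i is ih =>
    intro c d hkeys
    simp only [List.foldl_cons]
    rw [pvInner i _ c d hkeys]
    rw [ih _ _ ?_]
    · simp only [pvGridItems, List.length_cons, Prod.mk.injEq]
      refine ⟨by push_cast; ring, by simp [List.append_assoc]⟩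
    · intro k hk
      simp only [PySem.Dict.keys, List.map_append, List.mem_append] at hk
      rcases hk with hk | hk
      · have : k ∈ d.keys := by simp [PySem.Dict.keys, hk]
        have := hkeys _ this; omega
      · simp only [List.mem_map] at hk
        obtain ⟨⟨k', v⟩, hmem, hk'⟩ := hk
        subst hk'
        exact pvRowItems_key_le i _ c _ v hmem

lemma pvA_eq (nl nc : Int) (t : List (List String)) :
    listarQuadradosLocal nl nc t = pvGridItems nc 0 (PySem.List.pyRange 0 nl 1) := by
  unfold listarQuadradosLocal
  rw [pvOuter nc _ 0 PySem.Dict.empty (by simp [PySem.Dict.empty, PySem.Dict.keys])]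
  simp [PySem.Dict.empty]

lemma pvGrid_nil_of_nc_nonpos (nc : Int) (hnc : nc ≤ 0) :
    ∀ (is : List Int) (c : Int), pvGridItems nc c is = [] := by
  intro is
  induction is with
  | nil => intro c; simp [pvGridItems]
  | cons i is ih =>
    intro c
    rw [pvGridItems, PySem.List.pyRange_one_eq_nil hnc]
    simp [pvRowItems, ih]

lemma pvRow_eq (i nc : Int) (hnc : 0 < nc) :
    ∀ (n : Nat) (s : Int), 0 ≤ s → s + n = nc →
    pvRowItems i (i * nc + s) (PySem.List.pyRange s nc 1) =
      (PySem.List.pyRange (i * nc + s) (i * nc + nc) 1).map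
        (fun k => (k + 1, PySem.Int.floordiv k nc, PySem.Int.mod k nc)) := by
  intro n
  induction n with
  | zero =>
    intro s _ hsn
    have hs : s = nc := by omega
    rw [hs, PySem.List.pyRange_one_eq_nil (le_refl nc),
        PySem.List.pyRange_one_eq_nil (le_refl (i * nc + nc))]
    simp [pvRowItems]
  | succ n ih =>
    intro s hs hsn
    have hslt : s < nc := by omega
    rw [PySem.List.pyRange_one_cons hslt,
        PySem.List.pyRange_one_cons (show i * nc + s < i * nc + nc by omega)]
    simp only [pvRowItems, List.map_cons]
    have hdiv : PySem.Int.floordiv (i * nc + s) nc = i := by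
      rw [PySem.Int.floordiv_eq_ediv_of_pos hnc]
      rw [show i * nc + s = s + i * nc by ring]
      rw [Int.add_mul_ediv_right s i (by omega : nc ≠ 0),
          Int.ediv_eq_zero_of_lt hs hslt]
      ring
    have hmod : PySem.Int.mod (i * nc + s) nc = s := by
      rw [PySem.Int.mod_eq_emod_of_pos hnc]
      rw [show i * nc + s = s + i * nc by ring]
      rw [Int.add_mul_emod_self_right, Int.emod_eq_of_lt hs hslt]
    rw [hdiv, hmod, show i * nc + s + 1 = i * nc + (s + 1) from by ring]
    rw [ih (s + 1) (by omega) (by omega)]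

lemma pvGridItems_append (nc : Int) : ∀ (is1 is2 : List Int) (c : Int),
    pvGridItems nc c (is1 ++ is2) =
      pvGridItems nc c is1 ++
        pvGridItems nc (c + is1.length * ((PySem.List.pyRange 0 nc 1).length : Int)) is2 := by
  intro is1
  induction is1 with
  | nil => intro is2 c; simp [pvGridItems]
  | cons i is1 ih =>
    intro is2 c
    simp only [List.cons_append, pvGridItems, ih, List.length_cons, List.append_assoc]
    congr 3
    push_cast
    ring

lemma pvGrid_eq (nc : Int) (hnc : 0 < nc) :
    ∀ (n : Nat),
    pvGridItems nc 0 (PySem.List.pyRange 0 (n : Int) 1) =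
      (PySem.List.pyRange 0 ((n : Int) * nc) 1).map
        (fun k => (k + 1, PySem.Int.floordiv k nc, PySem.Int.mod k nc)) := by
  intro n
  induction n with
  | zero => simp [PySem.List.pyRange_one_eq_nil, pvGridItems]
  | succ n ih =>
    have h1 : ((n + 1 : Nat) : Int) = (n : Int) + 1 := by push_cast; ring
    have e2 : ((n : Int) + 1) * nc = (n : Int) * nc + nc := by ring
    have hlennc : ((PySem.List.pyRange 0 nc 1).length : Int) = nc := by
      rw [PySem.List.length_pyRange_one]; omega
    have hlen : ((PySem.List.pyRange 0 (n : Int) 1).length : Int) = (n : Int) := by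
      rw [PySem.List.length_pyRange_one]; simp
    have hrow := pvRow_eq (n : Int) nc hnc nc.toNat 0 (le_refl 0) (by omega)
    rw [h1, PySem.List.pyRange_one_succ_right (by positivity : (0 : Int) ≤ (n : Int)),
        pvGridItems_append, ih, e2,
        PySem.List.pyRange_one_append 0 ((n : Int) * nc) ((n : Int) * nc + nc)
          (by positivity) (by nlinarith),
        List.map_append]
    congr 1
    rw [hlen, hlennc, pvGridItems, pvGridItems, List.append_nil]
    rw [show (0 : Int) + (n : Int) * nc = (n : Int) * nc + 0 from by ring, hrow]
    rw [show (n : Int) * nc + 0 = (n : Int) * nc from by ring]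

-- ===== VERDICT (by name: the statement is the Claim_ definition above) =====
theorem listarQuadradosLocal_spec : Claim_equal_listarQuadradosLocal := by
  intro nl nc t _
  unfold Spec_listarQuadradosLocal listarQuadradosLocal_alt
  rw [pvA_eq]
  split_ifs with h
  · rcases h with h | h
    · rw [PySem.List.pyRange_one_eq_nil h]; simp [pvGridItems]
    · exact pvGrid_nil_of_nc_nonpos nc h _ 0
  · push Not at h
    obtain ⟨h1, h2⟩ := h
    have : nl = (nl.toNat : Int) := by omega
    rw [this]
    exact pvGrid_eq nc (by omega) nl.toNat
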